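-- pv_equiv track=rewrite | github.com/dominictarro/Borderlands | borderlands/utilities/misc.py | parse_alphabet_items
-- ===== SOURCE A (Python) =====
-- import string
-- from typing import Callable, List
--
-- ALPHANUMERICS = string.ascii_letters + string.digits
--
-- def parse_alphabet_items(
--     text: str, alphabet: str = ALPHANUMERICS, exclude: bool = False
-- ) -> List[str]:
--     """Parses substrings whose characters are found in `alphabet`.
--
--     :param text:        Text to iterate
--     :param alphabet:    Characters to look for
--     :param exclude:     Parse substrings whose characters are **not** found\
--         in `alphabet`
--     :return:            Section of `text` where all characters are found in\
--         `alphabet`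
--
--     >>> parse_alphabet_items("one, two three, four")
--     >>> ['one', 'two', 'three', 'four']
--
--     >>> parse_alphabet_items("12, 34a 5b6 7", alphabet=string.digits)
--     >>> ['12', '34', '5', '6', '7']
--     """
--     tail_pointer_logic: Callable[[str], bool] = lambda char: (char not in alphabet)
--     head_pointer_logic: Callable[[str], bool] = lambda char: (char in alphabet)
--
--     # Switch head and tail pointer checks if excluding
--     if exclude:
--         tail_pointer_logic, head_pointer_logic = (
--             head_pointer_logic,
--             tail_pointer_logic,
--         )
--
--     items: List[str] = []
--     tail, head = 0, 0
--     while True: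
--         # Increment for characters not in alphabet
--         # Exclude: Increment for characters in alphabet
--         while tail < len(text) and tail_pointer_logic(text[tail]):
--             tail += 1
--
--         # Terminate parsing if at end
--         if tail >= len(text):
--             break
--
--         # Start of item
--         head = tail
--         # Increment for characters in alphabet
--         # Exclude: Increment for characters not in alphabet
--         while head < len(text) and head_pointer_logic(text[head]):
--             head += 1
--
--         # Add substring to list
--         items.append(text[tail:head])
--
--         # Continue loop at next character
--         tail = head + 1
--     return items
-- ===== SOURCE B (Python) =====
-- import string
-- from typing import List
--
-- ALPHANUMERICS = string.ascii_letters + string.digits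
--
-- def parse_alphabet_items(
--     text: str, alphabet: str = ALPHANUMERICS, exclude: bool = False
-- ) -> List[str]:
--     """Single forward pass with a run accumulator: collect maximal runs of
--     characters whose membership in `alphabet` differs from `exclude`."""
--     items: List[str] = []
--     run = None  # current run of matching characters, or None
--     for char in text:
--         if (char in alphabet) != exclude:
--             run = char if run is None else run + char
--         else:
--             if run is not None:
--                 items.append(run)
--                 run = None
--     if run is not None:
--         items.append(run)
--     return items
-- ===== Notes on version B (the rewrite author's own statement) =====
-- stated objective: idiomatic
-- what changed: Replaced the two-pointer index walk (inner while loops advancing tail/head with slicing) by a single forward character pass with one XOR predicate and a run accumulator flushed at run boundaries.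
import Mathlib
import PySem

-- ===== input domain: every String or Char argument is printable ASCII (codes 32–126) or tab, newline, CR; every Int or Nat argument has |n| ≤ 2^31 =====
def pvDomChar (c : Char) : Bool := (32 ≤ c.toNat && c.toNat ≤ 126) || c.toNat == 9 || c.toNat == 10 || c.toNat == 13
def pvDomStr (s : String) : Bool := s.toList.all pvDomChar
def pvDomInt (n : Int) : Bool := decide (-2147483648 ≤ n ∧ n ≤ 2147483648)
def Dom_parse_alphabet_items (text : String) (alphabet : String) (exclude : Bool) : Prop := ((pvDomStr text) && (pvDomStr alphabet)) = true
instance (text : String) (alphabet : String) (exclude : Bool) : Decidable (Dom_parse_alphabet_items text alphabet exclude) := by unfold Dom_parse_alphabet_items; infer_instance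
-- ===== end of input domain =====

-- B replaces A's two-pointer index walk by a single forward pass with a run accumulator (objective: idiomatic).

-- ===== PORT A =====
-- inner 'while i < len(text) and q(text[i]): i += 1' loops of A
def pvSkipA (chars : List Char) (q : Char → Bool) (i : Nat) : Nat :=
  if h : i < chars.length then
    if q chars[i] then pvSkipA chars q (i + 1) else i
  else i
termination_by chars.length - i

theorem pvSkipA_ge (chars : List Char) (q : Char → Bool) (i : Nat) : i ≤ pvSkipA chars q i := by
  fun_induction pvSkipA chars q i with
  | case1 i h hq ih => omega
  | case2 i h hq => omega
  | case3 i h => omega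

-- outer 'while True' loop of A, recursing on the tail pointer; text[tail:head] = (drop tail).take (head-tail) (exact: 0 ≤ tail ≤ head)
def pvLoopA (chars : List Char) (tailP headP : Char → Bool) (tail : Nat) (items : List String) : List String :=
  let t := pvSkipA chars tailP tail
  if _h : t ≥ chars.length then items
  else
    let h := pvSkipA chars headP t
    pvLoopA chars tailP headP (h + 1) (items ++ [String.ofList ((chars.drop t).take (h - t))])
termination_by chars.length - tail
decreasing_by
  have h1 := pvSkipA_ge chars tailP tail
  have h2 := pvSkipA_ge chars headP (pvSkipA chars tailP tail)
  omega

def parse_alphabet_items (text : String) (alphabet : String) (exclude : Bool) : List String :=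
  let tailP0 : Char → Bool := fun c => !(alphabet.toList.contains c)
  let headP0 : Char → Bool := fun c => alphabet.toList.contains c
  let tailP := if exclude then headP0 else tailP0
  let headP := if exclude then tailP0 else headP0
  pvLoopA text.toList tailP headP 0 []

-- ===== PORT B =====
-- B's single forward pass: run accumulator (none = not inside a run)
def pvLoopB (p : Char → Bool) (chars : List Char) (items : List String) (run : Option (List Char)) : List String :=
  match chars with
  | [] =>
    match run with
    | none => items
    | some r => items ++ [String.ofList r]
  | c :: rest =>
    if p c then
      pvLoopB p rest items (some (match run with | none => [c] | some r => r ++ [c]))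
    else
      match run with
      | none => pvLoopB p rest items none
      | some r => pvLoopB p rest (items ++ [String.ofList r]) none

def parse_alphabet_items_alt (text : String) (alphabet : String) (exclude : Bool) : List String :=
  pvLoopB (fun c => alphabet.toList.contains c != exclude) text.toList [] none

-- ===== PRECONDITION & SPEC =====
def Spec_parse_alphabet_items (text : String) (alphabet : String) (exclude : Bool) (out : List String) : Prop := out = parse_alphabet_items_alt text alphabet exclude
instance (text : String) (alphabet : String) (exclude : Bool) (out : List String) : Decidable (Spec_parse_alphabet_items text alphabet exclude out) := by unfold Spec_parse_alphabet_items; infer_instance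

-- ===== CLAIM (what is proved, stated in full; the proofs are below) =====
def Claim_equal_parse_alphabet_items : Prop := ∀ (text : String) (alphabet : String) (exclude : Bool), Dom_parse_alphabet_items text alphabet exclude → Spec_parse_alphabet_items text alphabet exclude (parse_alphabet_items text alphabet exclude)

-- ===== LEMMAS AND PROOFS =====

-- reference decomposition: the maximal p-runs of a list
def pvGroups (p : Char → Bool) : List Char → List String
  | [] => []
  | c :: rest =>
    if p c then String.ofList (c :: rest.takeWhile p) :: pvGroups p (rest.dropWhile p)
    else pvGroups p rest
termination_by l => l.length
decreasing_by
  · have := List.length_dropWhile_le p rest; simpa using Nat.lt_succ_of_le this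
  · simp

theorem pvGroups_dropWhile_not (p : Char → Bool) (l : List Char) :
    pvGroups p (l.dropWhile (fun c => !p c)) = pvGroups p l := by
  induction l with
  | nil => simp
  | cons c rest ih =>
    by_cases hc : p c
    · simp [hc]
    · simp [hc, ih, pvGroups]

theorem pvSkipA_drop (chars : List Char) (q : Char → Bool) (i : Nat) :
    chars.drop (pvSkipA chars q i) = (chars.drop i).dropWhile q := by
  fun_induction pvSkipA chars q i with
  | case1 i h hq ih =>
    rw [ih, List.drop_eq_getElem_cons h, List.dropWhile_cons, if_pos hq]
  | case2 i h hq =>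
    rw [List.drop_eq_getElem_cons h, List.dropWhile_cons, if_neg hq]
  | case3 i h =>
    rw [List.drop_eq_nil_of_le (by omega)]
    simp

theorem pvSkipA_eq (chars : List Char) (q : Char → Bool) (i : Nat) :
    pvSkipA chars q i = i + ((chars.drop i).takeWhile q).length := by
  fun_induction pvSkipA chars q i with
  | case1 i h hq ih =>
    rw [ih, List.drop_eq_getElem_cons h, List.takeWhile_cons, if_pos hq]
    simp; omega
  | case2 i h hq =>
    rw [List.drop_eq_getElem_cons h, List.takeWhile_cons, if_neg hq]
    simp
  | case3 i h =>
    rw [List.drop_eq_nil_of_le (by omega)]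
    simp

-- where pvSkipA stops, the scanned predicate is false
theorem pvSkipA_stop (chars : List Char) (q : Char → Bool) (i : Nat)
    (h : pvSkipA chars q i < chars.length) : q chars[pvSkipA chars q i] = false := by
  fun_induction pvSkipA chars q i with
  | case1 i hlt hq ih => exact ih h
  | case2 i hlt hq => simpa using hq
  | case3 i hlt => omega

theorem take_takeWhile_length {α : Type} (q : α → Bool) (l : List α) :
    l.take (l.takeWhile q).length = l.takeWhile q := by
  induction l with
  | nil => simp
  | cons c rest ih =>
    rw [List.takeWhile_cons]
    by_cases hc : q c
    · simp [hc, ih]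
    · simp [hc]

-- A's outer loop produces the run decomposition of the suffix
theorem pvLoopA_eq_groups (chars : List Char) (p : Char → Bool) (tail : Nat) (items : List String) :
    pvLoopA chars (fun c => !p c) p tail items = items ++ pvGroups p (chars.drop tail) := by
  fun_induction pvLoopA chars (fun c => !p c) p tail items with
  | case1 tail items t ht =>
    rw [← pvGroups_dropWhile_not, ← pvSkipA_drop, List.drop_eq_nil_of_le (by omega)]
    simp [pvGroups]
  | case2 tail items t ht h ih =>
    replace ht : t < chars.length := by omega
    rw [ih, ← pvGroups_dropWhile_not (l := chars.drop tail), ← pvSkipA_drop,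
      List.append_assoc]
    congr 1
    -- t stops on a p-character
    have hstop := pvSkipA_stop chars (fun c => !p c) tail ht
    have hpt : p chars[t] = true := by simpa using hstop
    have hdrop : chars.drop t = chars[t] :: chars.drop (t + 1) := List.drop_eq_getElem_cons ht
    -- the slice is the maximal p-run at t
    have hlen : h - t = ((chars.drop t).takeWhile p).length := by
      have := pvSkipA_eq chars p t; omega
    have hslice : (chars.drop t).take (h - t) = (chars.drop t).takeWhile p := by
      rw [hlen, take_takeWhile_length]
    -- the rest after the run
    have hrest : (chars.drop t).dropWhile p = chars.drop h := (pvSkipA_drop chars p t).symm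
    have hnext : pvGroups p (chars.drop h) = pvGroups p (chars.drop (h + 1)) := by
      by_cases hh : h < chars.length
      · have hstopH : p chars[h] = false := pvSkipA_stop chars p t hh
        rw [List.drop_eq_getElem_cons hh, pvGroups, if_neg (by simp [hstopH])]
      · rw [List.drop_eq_nil_of_le (by omega), List.drop_eq_nil_of_le (by omega)]
    rw [hdrop, pvGroups, if_pos hpt, ← List.takeWhile_cons_of_pos hpt, ← hdrop, hslice,
      ← List.dropWhile_cons_of_pos hpt, ← hdrop, hrest, hnext]
    simp

-- B's pass produces the same decomposition (both accumulator states at once)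
theorem pvLoopB_eq (p : Char → Bool) (chars : List Char) : ∀ (items : List String),
    pvLoopB p chars items none = items ++ pvGroups p chars ∧
    ∀ (r : List Char), pvLoopB p chars items (some r)
      = items ++ String.ofList (r ++ chars.takeWhile p) :: pvGroups p (chars.dropWhile p) := by
  induction chars with
  | nil => intro items; simp [pvLoopB, pvGroups]
  | cons c rest ih =>
    intro items
    constructor
    · by_cases hc : p c
      · rw [pvLoopB, if_pos hc, (ih items).2 [c], pvGroups, if_pos hc]
        simp
      · rw [pvLoopB, if_neg hc, (ih items).1, pvGroups, if_neg hc]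
    · intro r
      by_cases hc : p c
      · rw [pvLoopB, if_pos hc, (ih items).2 (r ++ [c]),
          List.takeWhile_cons_of_pos hc, List.dropWhile_cons_of_pos hc]
        simp
      · rw [pvLoopB, if_neg hc, ((ih (items ++ [String.ofList r])).1),
          List.takeWhile_cons_of_neg hc, List.dropWhile_cons_of_neg hc, pvGroups, if_neg hc]
        simp

-- ===== VERDICT (by name: the statement is the Claim_ definition above) =====
theorem parse_alphabet_items_spec : Claim_equal_parse_alphabet_items := by
  intro text alphabet exclude _
  show parse_alphabet_items text alphabet exclude = parse_alphabet_items_alt text alphabet exclude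
  unfold parse_alphabet_items parse_alphabet_items_alt
  rw [(pvLoopB_eq _ text.toList []).1]
  cases exclude with
  | false =>
    simp only [if_neg Bool.false_ne_true, Bool.bne_false]
    exact pvLoopA_eq_groups text.toList (fun c => alphabet.toList.contains c) 0 []
  | true =>
    simp only [if_pos rfl, Bool.bne_true]
    have hq : (fun c => alphabet.toList.contains c)
        = (fun c => !(!(alphabet.toList.contains c))) := by funext c; simp
    rw [hq]
    exact pvLoopA_eq_groups text.toList (fun c => !(alphabet.toList.contains c)) 0 []
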